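-- pv_equiv track=rewrite | github.com/cey-ela/Slicker | database/update_databases.py | convert_categories
-- ===== SOURCE A (Python) =====
-- def convert_categories(category):
--     """Before arriving at any of the destinations it goes through this func to suffix CONT. where necessary for the
--     Maestro Ticker scene.
--     It does so by checking each category against the previous category, if there is a match,  the current cat(egory)
--     gets suffixed."""
--
--     first_word = None
--
--     for index, cat in enumerate(category):
--         cat = cat.replace("BREAKING", "BREAKING NEWS")
--         cat = cat.replace("ENTS", "ENTERTAINMENT")
--
--         if cat != "WEATHER" and cat != "CONTACT US" and cat != "BLANK":
--             if cat != first_word: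
--                 first_word = cat
--             else:
--                 cat += " CONT."
--         else:
--             first_word = None
--
--         category[index] = cat
--
--     return category
-- ===== SOURCE B (Python) =====
-- def convert_categories(category):
--     """Transform every element first, then walk maximal runs of consecutive equal
--     categories: non-reset runs keep their first member and suffix ' CONT.' to the rest.
--     Mutates the list in place (slice assignment) and returns it, like the original."""
--     resets = ("WEATHER", "CONTACT US", "BLANK")
--     t = [c.replace("BREAKING", "BREAKING NEWS").replace("ENTS", "ENTERTAINMENT")
--          for c in category]
--     out = []
--     i, n = 0, len(t)
--     while i < n:
--         v = t[i]
--         j = i + 1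
--         while j < n and t[j] == v:
--             j += 1
--         if v in resets:
--             out.extend(t[i:j])
--         else:
--             out.append(v)
--             out.extend(m + " CONT." for m in t[i + 1:j])
--         i = j
--     category[:] = out
--     return category
-- ===== Notes on version B (the rewrite author's own statement) =====
-- stated objective: alternative
-- what changed: Instead of a per-element loop carrying a previous-category sentinel, B first maps the two replacements over the whole list and then walks maximal runs of consecutive equal transformed values, suffixing ' CONT.' to every member of a non-reset run after its first.
import Mathlib
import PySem

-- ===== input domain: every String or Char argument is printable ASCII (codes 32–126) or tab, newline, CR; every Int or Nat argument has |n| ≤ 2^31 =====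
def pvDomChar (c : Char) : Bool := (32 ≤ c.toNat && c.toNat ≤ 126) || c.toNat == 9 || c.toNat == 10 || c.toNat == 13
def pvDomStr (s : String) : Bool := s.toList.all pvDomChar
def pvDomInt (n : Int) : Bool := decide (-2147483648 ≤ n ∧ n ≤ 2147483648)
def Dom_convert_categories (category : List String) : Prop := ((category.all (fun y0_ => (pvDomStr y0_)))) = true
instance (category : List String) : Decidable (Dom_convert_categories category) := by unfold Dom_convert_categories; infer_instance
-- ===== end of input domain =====

-- B rebuilds the same list contents by run-grouping instead of A's previous-category sentinel.
-- Python A mutates `category` in place and returns it; B mutates it the same way (slice assignment);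
-- the equivalence proved here is about the returned list of strings.

-- shared helper: the two .replace calls applied to one element (used verbatim by both Pythons)
def pvTrans (s : String) : String :=
  PySem.Str.replace (PySem.Str.replace s "BREAKING" "BREAKING NEWS") "ENTS" "ENTERTAINMENT"

-- ===== PORT A =====
-- A's loop: state = first_word (None or the last non-reset transformed category), emit in order
def convertLoopA (fw : Option String) : List String → List String
  | [] => []
  | c :: rest =>
    let cat := pvTrans c
    if cat ≠ "WEATHER" ∧ cat ≠ "CONTACT US" ∧ cat ≠ "BLANK" then
      if some cat ≠ fw then cat :: convertLoopA (some cat) rest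
      else (cat ++ " CONT.") :: convertLoopA fw rest
    else cat :: convertLoopA none rest

def convert_categories (category : List String) : List String :=
  convertLoopA none category

-- ===== PORT B =====
def pvIsReset (s : String) : Bool := s == "WEATHER" || s == "CONTACT US" || s == "BLANK"

-- B's run walker over the already-transformed list (inner while = takeWhile/dropWhile)
def pvRuns : List String → List String
  | [] => []
  | v :: xs =>
    let run := xs.takeWhile (· == v)
    let rest := xs.dropWhile (· == v)
    (if pvIsReset v then v :: run else v :: run.map (· ++ " CONT.")) ++ pvRuns rest
  termination_by l => l.length
  decreasing_by
    have := List.length_dropWhile_le (· == v) xs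
    simpa using Nat.lt_succ_of_le this

def convert_categories_alt (category : List String) : List String :=
  pvRuns (category.map pvTrans)

-- ===== PRECONDITION & SPEC =====
def Spec_convert_categories (category : List String) (out : List String) : Prop := out = convert_categories_alt category
instance (category : List String) (out : List String) : Decidable (Spec_convert_categories category out) := by unfold Spec_convert_categories; infer_instance

-- ===== CLAIM (what is proved, stated in full; the proofs are below) =====
def Claim_equal_convert_categories : Prop := ∀ (category : List String), Dom_convert_categories category → Spec_convert_categories category (convert_categories category)

-- ===== LEMMAS AND PROOFS =====

-- A's loop on the raw list equals the same loop run over the pre-transformed list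
def loopT (fw : Option String) : List String → List String
  | [] => []
  | cat :: rest =>
    if cat ≠ "WEATHER" ∧ cat ≠ "CONTACT US" ∧ cat ≠ "BLANK" then
      if some cat ≠ fw then cat :: loopT (some cat) rest
      else (cat ++ " CONT.") :: loopT fw rest
    else cat :: loopT none rest

lemma convertLoopA_eq_loopT (fw : Option String) (l : List String) :
    convertLoopA fw l = loopT fw (l.map pvTrans) := by
  induction l generalizing fw with
  | nil => rfl
  | cons c rest ih => simp only [convertLoopA, loopT, List.map_cons]; split_ifs <;> simp [ih]

lemma pvRuns_cons_reset (v : String) (xs : List String) (hv : pvIsReset v = true) :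
    pvRuns (v :: xs)
      = (v :: xs.takeWhile (· == v)) ++ pvRuns (xs.dropWhile (· == v)) := by
  rw [pvRuns, hv]; simp

lemma pvRuns_cons_go (v : String) (xs : List String) (hv : pvIsReset v = false) :
    pvRuns (v :: xs)
      = (v :: (xs.takeWhile (· == v)).map (· ++ " CONT.")) ++ pvRuns (xs.dropWhile (· == v)) := by
  rw [pvRuns, hv]; simp

lemma isReset_false_cond (v : String) (hv : pvIsReset v = false) :
    v ≠ "WEATHER" ∧ v ≠ "CONTACT US" ∧ v ≠ "BLANK" := by
  simpa [pvIsReset, not_or, and_assoc] using hv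

lemma isReset_true_cond (v : String) (hv : pvIsReset v = true) :
    ¬ (v ≠ "WEATHER" ∧ v ≠ "CONTACT US" ∧ v ≠ "BLANK") := by
  have h : v = "WEATHER" ∨ v = "CONTACT US" ∨ v = "BLANK" := by
    simpa [pvIsReset, or_assoc] using hv
  rcases h with h | h | h
  · exact fun hc => hc.1 h
  · exact fun hc => hc.2.1 h
  · exact fun hc => hc.2.2 h

-- a reset run is consumed element by element: pvRuns splits off the run in one step
lemma pvRuns_reset_split (v : String) (hv : pvIsReset v = true) (xs : List String) :
    pvRuns xs = xs.takeWhile (· == v) ++ pvRuns (xs.dropWhile (· == v)) := by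
  cases xs with
  | nil => simp
  | cons y ys =>
    by_cases h : y = v
    · subst h
      simp only [List.takeWhile_cons, List.dropWhile_cons, beq_self_eq_true, if_true]
      rw [pvRuns_cons_reset y ys hv]
    · have hb : (y == v) = false := beq_eq_false_iff_ne.2 h
      simp [hb]

-- main invariant, by strong induction on the (transformed) list length:
--   loopT none t = pvRuns t, and for a non-reset carried word w,
--   loopT (some w) t suffixes the leading w-run and then behaves like pvRuns.
lemma loopT_eq_pvRuns_aux (n : ℕ) :
    ∀ t : List String, t.length ≤ n →
      loopT none t = pvRuns t ∧
      (∀ w : String, pvIsReset w = false →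
        loopT (some w) t
          = (t.takeWhile (· == w)).map (· ++ " CONT.") ++ pvRuns (t.dropWhile (· == w))) := by
  induction n with
  | zero =>
    intro t ht
    have : t = [] := List.eq_nil_of_length_eq_zero (Nat.le_zero.mp ht)
    subst this
    exact ⟨by simp [loopT, pvRuns], fun w _ => by simp [loopT, pvRuns]⟩
  | succ n ih =>
    intro t ht
    cases t with
    | nil => exact ⟨by simp [loopT, pvRuns], fun w _ => by simp [loopT, pvRuns]⟩
    | cons x xs =>
      have hxs : xs.length ≤ n := by simp at ht; omega
      constructor
      · -- loopT none (x :: xs) = pvRuns (x :: xs)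
        by_cases hx : pvIsReset x = true
        · rw [loopT, if_neg (isReset_true_cond x hx), pvRuns_cons_reset x xs hx]
          rw [(ih xs hxs).1, pvRuns_reset_split x hx xs]
          simp
        · have hxf : pvIsReset x = false := by simpa using hx
          rw [loopT, if_pos (isReset_false_cond x hxf), if_pos (by simp),
            pvRuns_cons_go x xs hxf]
          rw [(ih xs hxs).2 x hxf]
          simp
      · -- loopT (some w) (x :: xs), w non-reset
        intro w hw
        by_cases hx : pvIsReset x = true
        · -- x reset, hence x ≠ w
          have hxw : x ≠ w := by intro h; subst h; rw [hx] at hw; exact absurd hw (by simp)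
          have hb : (x == w) = false := beq_eq_false_iff_ne.2 hxw
          rw [loopT, if_neg (isReset_true_cond x hx)]
          rw [List.takeWhile_cons, List.dropWhile_cons]
          simp only [hb, if_neg Bool.false_ne_true, List.map_nil, List.nil_append]
          rw [(ih xs hxs).1, pvRuns_cons_reset x xs hx, pvRuns_reset_split x hx xs]
          simp
        · have hxf : pvIsReset x = false := by simpa using hx
          by_cases hxw : x = w
          · -- continue the w-run: suffix CONT.
            subst hxw
            rw [loopT, if_pos (isReset_false_cond x hxf), if_neg (by simp)]
            rw [List.takeWhile_cons, List.dropWhile_cons]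
            simp only [beq_self_eq_true, if_true, List.map_cons, List.cons_append]
            rw [(ih xs hxs).2 x hxf]
          · -- new non-reset word: start a fresh run
            have hb : (x == w) = false := beq_eq_false_iff_ne.2 hxw
            rw [loopT, if_pos (isReset_false_cond x hxf), if_pos (by simp [hxw])]
            rw [List.takeWhile_cons, List.dropWhile_cons]
            simp only [hb, if_neg Bool.false_ne_true, List.map_nil, List.nil_append]
            rw [(ih xs hxs).2 x hxf, pvRuns_cons_go x xs hxf]
            simp

lemma loopT_eq_pvRuns (t : List String) : loopT none t = pvRuns t :=
  (loopT_eq_pvRuns_aux t.length t le_rfl).1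

-- ===== VERDICT (by name: the statement is the Claim_ definition above) =====
theorem convert_categories_spec : Claim_equal_convert_categories := by
  intro category _
  unfold Spec_convert_categories convert_categories convert_categories_alt
  rw [convertLoopA_eq_loopT, loopT_eq_pvRuns]
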